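-- pv_equiv track=rewrite | github.com/HyunBin-Jang/algorithm | algorithms/17829.py | pulling
-- ===== SOURCE A (Python) =====
-- def pulling(graph, N):
--     if N == 1:
--         return graph[0][0]
--     tmp_graph = []
--     for i in range(N // 2):
--         tmp_low = []
--         for j in range(N // 2):
--             tmp = []
--             tmp.append(graph[2 * i][2 * j])
--             tmp.append(graph[2 * i][2 * j + 1])
--             tmp.append(graph[2 * i + 1][2 * j])
--             tmp.append(graph[2 * i + 1][2 * j + 1])
--             tmp.sort()
--             tmp_low.append(tmp[2])
--         tmp_graph.append(tmp_low)
--     return pulling(tmp_graph, N // 2)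
-- ===== SOURCE B (Python) =====
-- def _third_smallest(a, b, c, d):
--     # third smallest of four = second largest = max after discarding one maximum
--     hi = max(a, b, c, d)
--     if a == hi:
--         return max(b, c, d)
--     if b == hi:
--         return max(a, c, d)
--     if c == hi:
--         return max(a, b, d)
--     return max(a, b, c)
--
--
-- def pulling(graph, N):
--     while N != 1:
--         half = N // 2
--         graph = [
--             [_third_smallest(graph[2 * i][2 * j], graph[2 * i][2 * j + 1],
--                              graph[2 * i + 1][2 * j], graph[2 * i + 1][2 * j + 1])
--              for j in range(half)]
--             for i in range(half)]
--         N = half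
--     return graph[0][0]
-- ===== Notes on version B (the rewrite author's own statement) =====
-- stated objective: alternative
-- what changed: Replaces A's recursion by an iterative while-loop over a shrinking grid and computes each 2x2 block's third-smallest element as the max after discarding one maximum, instead of building, sorting and indexing a 4-element list per block.
import Mathlib
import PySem

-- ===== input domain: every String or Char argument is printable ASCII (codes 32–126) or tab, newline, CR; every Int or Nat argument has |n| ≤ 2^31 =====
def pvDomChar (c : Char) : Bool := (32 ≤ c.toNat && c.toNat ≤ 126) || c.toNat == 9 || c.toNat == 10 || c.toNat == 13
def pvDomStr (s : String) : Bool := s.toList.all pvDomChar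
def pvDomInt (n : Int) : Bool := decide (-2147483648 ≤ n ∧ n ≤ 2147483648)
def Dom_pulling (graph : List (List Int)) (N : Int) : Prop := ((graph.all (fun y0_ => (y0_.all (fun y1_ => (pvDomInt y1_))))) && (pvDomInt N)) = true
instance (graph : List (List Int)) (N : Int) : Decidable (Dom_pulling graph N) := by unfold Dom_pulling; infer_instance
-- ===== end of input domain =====

-- B replaces A's recursion by an iterative halving loop whose 2x2 blocks are combined
-- with an explicit "second largest of four" (max after discarding one maximum) instead
-- of building, sorting and indexing a 4-element list (objective: alternative decomposition).

-- ===== PORT A =====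
-- A's recursion diverges for N ≤ 0 (N // 2 never reaches 1); the 'N < 1 → 0' branch is a
-- totality guard for exactly those inputs, which Pre_pulling excludes.
def pulling (graph : List (List Int)) (N : Int) : Int :=
  if _h1 : N = 1 then PySem.List.pyGetD (PySem.List.pyGetD graph 0 []) 0 0
  else if _h2 : N < 1 then 0
  else
    let tmp_graph := (PySem.List.pyRange 0 (PySem.Int.floordiv N 2) 1).foldl
      (fun tmp_graph i =>
        let tmp_low := (PySem.List.pyRange 0 (PySem.Int.floordiv N 2) 1).foldl
          (fun tmp_low j =>
            let tmp : List Int := []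
            let tmp := tmp ++ [PySem.List.pyGetD (PySem.List.pyGetD graph (2*i) []) (2*j) 0]
            let tmp := tmp ++ [PySem.List.pyGetD (PySem.List.pyGetD graph (2*i) []) (2*j+1) 0]
            let tmp := tmp ++ [PySem.List.pyGetD (PySem.List.pyGetD graph (2*i+1) []) (2*j) 0]
            let tmp := tmp ++ [PySem.List.pyGetD (PySem.List.pyGetD graph (2*i+1) []) (2*j+1) 0]
            let tmp := PySem.List.sorted tmp (fun x => x) false
            tmp_low ++ [PySem.List.pyGetD tmp 2 0])
          []
        tmp_graph ++ [tmp_low])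
      []
    pulling tmp_graph (PySem.Int.floordiv N 2)
termination_by N.toNat
decreasing_by
  rw [PySem.Int.floordiv_eq_ediv_of_pos (by omega)]
  omega

-- ===== PORT B =====
def pvThirdSmallest (a b c d : Int) : Int :=
  let hi := max a (max b (max c d))
  if a = hi then max b (max c d)
  else if b = hi then max a (max c d)
  else if c = hi then max a (max b d)
  else max a (max b c)

-- B's 'while N != 1' loop; it likewise diverges for N ≤ 0, guarded the same way.
def pulling_alt (graph : List (List Int)) (N : Int) : Int :=
  if _h1 : N = 1 then PySem.List.pyGetD (PySem.List.pyGetD graph 0 []) 0 0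
  else if _h2 : N < 1 then 0
  else
    let half := PySem.Int.floordiv N 2
    pulling_alt
      ((PySem.List.pyRange 0 half 1).map (fun i =>
        (PySem.List.pyRange 0 half 1).map (fun j =>
          pvThirdSmallest
            (PySem.List.pyGetD (PySem.List.pyGetD graph (2*i) []) (2*j) 0)
            (PySem.List.pyGetD (PySem.List.pyGetD graph (2*i) []) (2*j+1) 0)
            (PySem.List.pyGetD (PySem.List.pyGetD graph (2*i+1) []) (2*j) 0)
            (PySem.List.pyGetD (PySem.List.pyGetD graph (2*i+1) []) (2*j+1) 0))))
      half
termination_by N.toNat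
decreasing_by
  rw [PySem.Int.floordiv_eq_ediv_of_pos (by omega)]
  omega

-- ===== PRECONDITION & SPEC =====
-- rows/columns A actually touches at the top level: one for N = 1, else 2 * (N // 2)
def pvNeed (N : Int) : Int := if N = 1 then 1 else 2 * PySem.Int.floordiv N 2

-- Pre_pulling is exactly where the Python A returns: N ≥ 1 (A recurses forever on N ≤ 0)
-- and the first pvNeed N rows exist and are that long (else IndexError); deeper levels
-- then index only the exact-size grids A itself builds.
def Pre_pulling (graph : List (List Int)) (N : Int) : Prop :=
  1 ≤ N ∧ pvNeed N ≤ (graph.length : Int) ∧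
    ∀ row ∈ graph.take (pvNeed N).toNat, pvNeed N ≤ (row.length : Int)
instance (graph : List (List Int)) (N : Int) : Decidable (Pre_pulling graph N) := by
  unfold Pre_pulling; infer_instance

def pvWitness_pulling : List (List Int) × Int := ([[1, 2], [3, 4]], 2)

def Spec_pulling (graph : List (List Int)) (N : Int) (out : Int) : Prop := out = pulling_alt graph N
instance (graph : List (List Int)) (N : Int) (out : Int) : Decidable (Spec_pulling graph N out) := by
  unfold Spec_pulling; infer_instance

-- ===== CLAIM (what is proved, stated in full; the proofs are below) =====
def Claim_equal_pulling : Prop := ∀ (graph : List (List Int)) (N : Int), Dom_pulling graph N → Pre_pulling graph N → Spec_pulling graph N (pulling graph N)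

-- ===== LEMMAS AND PROOFS =====

theorem pyGetD_four_two (p q r s : Int) : PySem.List.pyGetD [p, q, r, s] 2 0 = r := by
  simp [pysem]

-- sorted([a,b,c,d])[2] is the second largest of the four, i.e. pvThirdSmallest
set_option maxHeartbeats 1000000 in
theorem third_eq (a b c d : Int) :
    PySem.List.pyGetD (PySem.List.sorted [a, b, c, d] (fun x => x) false) 2 0 =
      pvThirdSmallest a b c d := by
  simp only [PySem.List.sorted_eq_foldl_insertBy, List.foldl]
  simp only [PySem.List.insertBy, decide_eq_true_eq]
  split_ifs
  all_goals simp only [PySem.List.insertBy, decide_eq_true_eq]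
  all_goals split_ifs
  all_goals simp only [PySem.List.insertBy, decide_eq_true_eq]
  all_goals split_ifs
  all_goals simp only [pyGetD_four_two, pvThirdSmallest]
  all_goals split_ifs
  all_goals omega

-- the two ports agree on EVERY input (both carry the same divergence guard);
-- strong induction on N.toNat, the measure of both recursions
theorem pulling_eq_alt_aux (k : Nat) : ∀ (graph : List (List Int)) (N : Int),
    N.toNat ≤ k → pulling graph N = pulling_alt graph N := by
  induction k with
  | zero =>
    intro graph N h
    have h1 : ¬ N = 1 := by omega
    have h2 : N < 1 := by omega
    rw [pulling, pulling_alt]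
    simp [h1, h2]
  | succ k ih =>
    intro graph N h
    rw [pulling, pulling_alt]
    by_cases h1 : N = 1
    · simp [h1]
    · by_cases h2 : N < 1
      · simp [h1, h2]
      · have hd : PySem.Int.floordiv N 2 = N / 2 :=
          PySem.Int.floordiv_eq_ediv_of_pos (by omega)
        simp only [dif_neg h1, dif_neg h2]
        rw [ih _ _ (by rw [hd]; omega)]
        congr 1
        simp only [PySem.List.foldl_append_singleton_eq_map, List.nil_append]
        refine List.map_congr_left fun i _ => ?_
        refine List.map_congr_left fun j _ => ?_
        exact third_eq _ _ _ _

theorem pulling_eq_alt (graph : List (List Int)) (N : Int) :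
    pulling graph N = pulling_alt graph N :=
  pulling_eq_alt_aux N.toNat graph N le_rfl

-- ===== VERDICT (by name: the statement is the Claim_ definition above) =====
theorem pulling_spec : Claim_equal_pulling := by
  intro graph N _ _
  unfold Spec_pulling
  exact pulling_eq_alt graph N
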